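-- pv_equiv track=rewrite | github.com/sroet/AoC2025_python | 06/solution.py | part_1
-- ===== SOURCE A (Python) =====
-- def part_1(data):
--     out = 0
--     values, operations = data
--     values = [[int(i) for i in val.split()] for val in values]
--     operations = operations.split()
--     # do transpose
--     for i, vals in enumerate(zip(*values)):
--         if operations[i] == "+":
--             out += sum(vals)
--         else:
--             temp = 1
--             for v in vals:
--                 temp *= v
--             out += temp
--     return out
-- ===== SOURCE B (Python) =====
-- def part_1(data):
--     values, operations = data
--     rows = [[int(t) for t in v.split()] for v in values]
--     ops = operations.split()
--     n = min((len(r) for r in rows), default=0)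
--     acc = [0 if ops[j] == "+" else 1 for j in range(n)]
--     for row in rows:
--         acc = [acc[j] + row[j] if ops[j] == "+" else acc[j] * row[j] for j in range(n)]
--     return sum(acc)
-- ===== Notes on version B (the rewrite author's own statement) =====
-- stated objective: alternative
-- what changed: B drops the zip(*values) transpose: it sizes the column count from the minimum row length, seeds one accumulator per column (0 for '+', 1 for '*'), and aggregates in a single row-major pass, summing the accumulators at the end.
import Mathlib
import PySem

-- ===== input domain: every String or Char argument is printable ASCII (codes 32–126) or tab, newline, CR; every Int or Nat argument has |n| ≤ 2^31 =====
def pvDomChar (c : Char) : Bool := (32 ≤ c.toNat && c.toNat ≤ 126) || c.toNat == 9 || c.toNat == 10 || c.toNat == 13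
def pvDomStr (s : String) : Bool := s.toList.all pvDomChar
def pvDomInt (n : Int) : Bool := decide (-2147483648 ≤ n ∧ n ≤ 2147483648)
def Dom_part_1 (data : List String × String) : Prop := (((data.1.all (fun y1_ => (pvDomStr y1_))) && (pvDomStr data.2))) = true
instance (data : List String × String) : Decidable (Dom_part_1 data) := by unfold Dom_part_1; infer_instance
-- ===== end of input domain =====

-- B replaces A's transpose-then-aggregate with a single row-major pass over a per-column
-- accumulator vector (different decomposition, same cost; objective: alternative).

-- ===== PORT A =====
-- zip(*values): truncating transpose to the shortest row; hand port of the zip builtin,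
-- exact because every index j is < every row's length.
def pvMinLenA (rows : List (List Int)) : Nat :=
  match rows with
  | [] => 0
  | r :: rs => rs.foldl (fun m x => min m x.length) r.length

def pvZipStar (rows : List (List Int)) : List (List Int) :=
  (List.range (pvMinLenA rows)).map (fun j => rows.map (fun r => r.getD j 0))

-- int(t) ported as (ofStr? t).getD 0; exact under Pre_ (every token parses).
-- operations[i] ported as pyGetD with default ""; exact under Pre_ (i < len operations).
def part_1 (data : List String × String) : Int :=
  let values := data.1.map (fun v => (PySem.Str.split₀ v).map (fun t => (PySem.Int.ofStr? t).getD 0))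
  let operations := PySem.Str.split₀ data.2
  (PySem.List.enumerate (pvZipStar values) 0).foldl
    (fun out iv =>
      if PySem.List.pyGetD operations iv.1 "" = "+" then
        out + iv.2.sum
      else
        out + iv.2.foldl (fun temp v => temp * v) 1) 0

-- ===== PORT B =====
-- indexing acc[j], row[j], ops[j] ported as getD; exact under Pre_ (j < n ≤ each length).
def part_1_alt (data : List String × String) : Int :=
  let rows := data.1.map (fun v => (PySem.Str.split₀ v).map (fun t => (PySem.Int.ofStr? t).getD 0))
  let ops := PySem.Str.split₀ data.2
  let n := match rows.map List.length with
           | [] => 0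
           | l :: ls => ls.foldl min l
  let acc0 := (List.range n).map (fun j => if ops.getD j "" = "+" then (0 : Int) else 1)
  (data.1.foldl
    (fun acc v =>
      let row := (PySem.Str.split₀ v).map (fun t => (PySem.Int.ofStr? t).getD 0)
      (List.range n).map (fun j =>
        if ops.getD j "" = "+" then acc.getD j 0 + row.getD j 0 else acc.getD j 0 * row.getD j 0))
    acc0).sum

-- ===== PRECONDITION & SPEC =====
-- Pre_ excludes exactly the inputs where Python A raises: a token int() rejects (ValueError),
-- or more columns (= min row length) than operation tokens (IndexError).
def pvNcols (values : List String) : Nat :=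
  match values with
  | [] => 0
  | v :: vs => vs.foldl (fun m s => min m (PySem.Str.split₀ s).length) (PySem.Str.split₀ v).length

def Pre_part_1 (data : List String × String) : Prop :=
  (∀ s ∈ data.1, ∀ t ∈ PySem.Str.split₀ s, (PySem.Int.ofStr? t).isSome = true) ∧
  pvNcols data.1 ≤ (PySem.Str.split₀ data.2).length

instance (data : List String × String) : Decidable (Pre_part_1 data) := by
  unfold Pre_part_1; infer_instance

def pvWitness_part_1 : (List String × String) := (["1 2 3", "4 5 6"], "+ * +")

def Spec_part_1 (data : List String × String) (out : Int) : Prop := out = part_1_alt data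
instance (data : List String × String) (out : Int) : Decidable (Spec_part_1 data out) := by
  unfold Spec_part_1; infer_instance

-- ===== CLAIM (what is proved, stated in full; the proofs are below) =====
def Claim_equal_part_1 : Prop := ∀ (data : List String × String), Dom_part_1 data → Pre_part_1 data → Spec_part_1 data (part_1 data)

-- ===== LEMMAS AND PROOFS =====

-- B's row loop, with the accumulator given as a range-map, computes each column's fold independently.
theorem pv_foldB (n : Nat) (step : Nat → Int → Int → Int) :
    ∀ (rows : List (List Int)) (h : Nat → Int),
      rows.foldl
        (fun acc row => (List.range n).map (fun j => step j (acc.getD j 0) (row.getD j 0)))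
        ((List.range n).map h)
      = (List.range n).map
          (fun j => rows.foldl (fun a row => step j a (row.getD j 0)) (h j)) := by
  intro rows
  induction rows with
  | nil => intro h; rfl
  | cons r rs ih =>
    intro h
    simp only [List.foldl_cons]
    have hstep : (List.range n).map
        (fun j => step j (((List.range n).map h).getD j 0) (r.getD j 0))
        = (List.range n).map (fun j => step j (h j) (r.getD j 0)) := by
      apply List.map_congr_left
      intro j hj
      rw [List.getD_eq_getElem?_getD, List.getElem?_map,
          List.getElem?_range (List.mem_range.mp hj)]
      rfl
    rw [hstep, ih]

theorem part_1_eq (data : List String × String) : part_1 data = part_1_alt data := by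
  rcases data with ⟨vals, opstr⟩
  unfold part_1 part_1_alt pvZipStar
  simp only []
  set rows : List (List Int) :=
    vals.map (fun v => (PySem.Str.split₀ v).map (fun t => (PySem.Int.ofStr? t).getD 0)) with hrows
  set ops := PySem.Str.split₀ opstr with hops
  have hn : (match rows.map List.length with
             | [] => 0
             | l :: ls => ls.foldl min l) = pvMinLenA rows := by
    unfold pvMinLenA
    cases rows with
    | nil => rfl
    | cons r rs =>
      simp only [List.map_cons, List.foldl_map]
  rw [hn]
  set n := pvMinLenA rows with hnn
  -- B side: push the foldl over vals to a foldl over rows, then use pv_foldB.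
  have hBfold :
      vals.foldl
        (fun acc v =>
          let row := (PySem.Str.split₀ v).map (fun t => (PySem.Int.ofStr? t).getD 0)
          (List.range n).map (fun j =>
            if ops.getD j "" = "+" then acc.getD j 0 + row.getD j 0
            else acc.getD j 0 * row.getD j 0))
        ((List.range n).map (fun j => if ops.getD j "" = "+" then (0 : Int) else 1))
      = (List.range n).map (fun j =>
          rows.foldl
            (fun a row => if ops.getD j "" = "+" then a + row.getD j 0 else a * row.getD j 0)
            (if ops.getD j "" = "+" then (0 : Int) else 1)) := by
    have h := pv_foldB n
      (fun j a v => if ops.getD j "" = "+" then a + v else a * v)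
      rows (fun j => if ops.getD j "" = "+" then (0 : Int) else 1)
    rw [hrows, List.foldl_map] at h
    exact h
  rw [hBfold]
  -- A side: turn the enumerate-foldl into a foldl over range n, then compare per column.
  rw [PySem.List.enumerate_eq_map_pyRange (d := ([] : List Int))]
  simp only [PySem.List.len_eq, List.length_map, List.length_range]
  rw [show ((n : Int)) = ((n : Nat) : Int) from rfl, PySem.List.pyRange_zero_nat]
  rw [List.map_map, List.foldl_map]
  simp only [Function.comp_def]
  refine Eq.trans (PySem.List.foldl_congr_mem _ _
    (fun (out : Int) (k : Nat) => out +
      (if ops.getD k "" = "+" then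
        List.foldl (fun a (row : List Int) => a + row.getD k 0) 0 rows
      else
        List.foldl (fun a (row : List Int) => a * row.getD k 0) 1 rows)) _ ?_) ?_
  · intro acc k hk
    have hkn : k < n := List.mem_range.mp hk
    have hcol : PySem.List.pyGetD ((List.range n).map (fun j => rows.map (fun r => r.getD j 0))) (k : Int) []
        = rows.map (fun r => r.getD k 0) := by
      rw [PySem.List.pyGetD_natCast, List.getD_eq_getElem?_getD, List.getElem?_map,
          List.getElem?_range hkn]
      rfl
    have hop : PySem.List.pyGetD ops ((k : Int)) "" = ops.getD k "" := by
      rw [PySem.List.pyGetD_natCast]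
    rw [hcol, hop]
    by_cases h : ops.getD k "" = "+" <;> simp only [h, if_true, if_false]
    · -- "+" column: sum of the column = running sum over the rows
      congr 1
      rw [PySem.List.foldl_add (g := fun (row : List Int) => row.getD k 0), zero_add]
    · -- "*" column: product over the mapped column = running product over the rows
      congr 1
      rw [List.foldl_map]
  · rw [PySem.List.foldl_add, zero_add]
    congr 1
    apply List.map_congr_left
    intro k hk
    by_cases h : ops.getD k "" = "+" <;> simp only [h, if_true, if_false]

-- ===== VERDICT (by name: the statement is the Claim_ definition above) =====
theorem part_1_spec : Claim_equal_part_1 := by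
  intro data _ _
  unfold Spec_part_1
  exact part_1_eq data
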